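-- pv_equiv track=rewrite | github.com/sle2001/CS640 | Lab_Assignment3/emulator.py | checkAndUpdateTopology
-- ===== SOURCE A (Python) =====
-- def link_nodes(routeTopology, id1, id2):
--     # Check if first ID is in the topology
--     if id1 in routeTopology:
--         if not id2 in routeTopology[id1]:
--             routeTopology[id1].append(id2)
--     else:
--         routeTopology[id1] = [id2]
--
--     # Check if second ID is in topology
--     if id2 in routeTopology:
--         if not id1 in routeTopology[id2]:
--             routeTopology[id2].append(id1)
--     else:
--         routeTopology[id2] = [id1]
--
--     return routeTopology
--
-- def cleanRouteTopology(routeTopology, old_routeTopology, itemToAdd):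
--     routeTopology[itemToAdd] = old_routeTopology[itemToAdd]
--     for item in routeTopology[itemToAdd]:
--         if not item in routeTopology:
--             routeTopology = cleanRouteTopology(routeTopology, old_routeTopology, item)
--     return routeTopology
--
-- def checkAndUpdateTopology(routeTopology, baseID, neighbors, thisID):
--     hasChanged = False
--
--     # Check if base ID is in topology
--     if baseID in routeTopology:
--         if not sorted(neighbors) == sorted(routeTopology[baseID]):
--             routeTopology[baseID] = neighbors
--             for neighbor in neighbors:
--                 link_nodes(routeTopology, neighbor, baseID)
--             hasChanged = True
--             routeTopology = cleanRouteTopology({}, routeTopology, thisID)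
--     else:
--         routeTopology[baseID] = neighbors
--         for neighbor in neighbors:
--             link_nodes(routeTopology, neighbor, baseID)
--         hasChanged = True
--         routeTopology = cleanRouteTopology({}, routeTopology, thisID)
--
--     return (routeTopology, hasChanged)
-- ===== SOURCE B (Python) =====
-- def checkAndUpdateTopology(routeTopology, baseID, neighbors, thisID):
--     # One merged change-check instead of A's two duplicated branches.
--     changed = baseID not in routeTopology or sorted(neighbors) != sorted(routeTopology[baseID])
--     if not changed:
--         return (routeTopology, False)
--     # Build the updated adjacency map without mutating the caller's data.
--     updated = {k: list(v) for k, v in routeTopology.items()}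
--     updated[baseID] = list(neighbors)
--     for n in neighbors:
--         adj = updated.get(n)
--         if adj is None:
--             updated[n] = [baseID]
--         elif baseID not in adj:
--             adj.append(baseID)
--         # (the reverse link n -> updated[baseID] is always already present: n is in neighbors)
--     # Prune unreachable nodes: iterative preorder DFS with an explicit worklist.
--     result = {}
--     stack = [thisID]
--     while stack:
--         node = stack.pop()
--         if node in result:
--             continue
--         adj = updated[node]          # KeyError exactly where A's recursive clean raises
--         result[node] = adj
--         stack.extend(reversed(adj))  # top of stack = first neighbor, preserving A's DFS order
--     return (result, True)
-- ===== Notes on version B (the rewrite author's own statement) =====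
-- stated objective: simpler
-- what changed: B computes the change condition once instead of A's two duplicated branches, links each neighbor with a single forward step (dropping link_nodes' provably dead reverse half), and prunes unreachable nodes with an iterative explicit-worklist DFS instead of A's recursive cleanRouteTopology.
import Mathlib
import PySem

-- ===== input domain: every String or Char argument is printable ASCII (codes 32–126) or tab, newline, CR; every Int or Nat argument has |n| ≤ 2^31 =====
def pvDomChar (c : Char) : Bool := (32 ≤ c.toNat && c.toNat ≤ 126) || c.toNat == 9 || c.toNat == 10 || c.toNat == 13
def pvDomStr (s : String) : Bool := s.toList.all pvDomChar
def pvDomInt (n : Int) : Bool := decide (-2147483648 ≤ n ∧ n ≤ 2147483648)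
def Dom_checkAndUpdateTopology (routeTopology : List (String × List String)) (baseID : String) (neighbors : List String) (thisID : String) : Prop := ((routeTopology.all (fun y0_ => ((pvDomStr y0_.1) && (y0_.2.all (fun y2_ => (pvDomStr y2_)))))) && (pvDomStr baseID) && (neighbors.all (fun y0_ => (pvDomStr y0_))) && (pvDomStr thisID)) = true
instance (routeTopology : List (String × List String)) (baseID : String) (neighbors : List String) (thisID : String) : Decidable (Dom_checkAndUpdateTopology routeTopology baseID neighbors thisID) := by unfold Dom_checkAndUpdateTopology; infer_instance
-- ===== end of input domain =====

-- B merges A's two duplicated update branches into one guarded by a single change condition and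
-- replaces A's recursive DFS prune (cleanRouteTopology) by an iterative worklist DFS; objective:
-- simpler.  Python A mutates its routeTopology argument (and the list objects reachable from it)
-- in place; B does not — the equivalence proved here is about the RETURN value only.

abbrev pvTopo := PySem.Dict String (List String)

-- ===== PORT A =====
-- literal port of link_nodes (both halves, in order)
def linkNodes (d : pvTopo) (id1 id2 : String) : pvTopo :=
  let d1 :=
    if d.contains id1 then
      (if (d.getD id1 []).contains id2 then d else d.insert id1 ((d.getD id1 []) ++ [id2]))
    else d.insert id1 [id2]
  if d1.contains id2 then
    (if (d1.getD id2 []).contains id1 then d1 else d1.insert id2 ((d1.getD id2 []) ++ [id1]))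
  else d1.insert id2 [id1]

-- literal port of the recursive cleanRouteTopology; `none` = Python's KeyError (excluded by Pre_).
-- The Nat argument is pure fuel making the general recursion total; the call below passes enough
-- fuel (one more than the number of keys) that it never runs out before the recursion finishes
-- or hits the KeyError, so it changes nothing on any input.
mutual
def cleanA : Nat → pvTopo → pvTopo → String → Option pvTopo
  | 0, _, _, _ => none
  | f + 1, topo, old, x =>
    match old.get? x with
    | none => none
    | some vs => cleanAList f (topo.insert x vs) old vs
termination_by f _ _ _ => (f, 0, 0)
def cleanAList : Nat → pvTopo → pvTopo → List String → Option pvTopo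
  | _, topo, _, [] => some topo
  | f, topo, old, v :: vs =>
    if topo.contains v then cleanAList f topo old vs
    else
      match cleanA f topo old v with
      | none => none
      | some t => cleanAList f t old vs
termination_by f _ _ vs => (f, 1, vs.length)
end

def checkAndUpdateTopology (routeTopology : List (String × List String)) (baseID : String) (neighbors : List String) (thisID : String) : (List (String × List String)) × Bool :=
  let d := PySem.Dict.ofList routeTopology
  if d.contains baseID then
    if ¬ (PySem.List.sorted neighbors (fun x => x.toList) false = PySem.List.sorted (d.getD baseID []) (fun x => x.toList) false) then
      let d1 := d.insert baseID neighbors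
      let d2 := neighbors.foldl (fun acc n => linkNodes acc n baseID) d1
      match cleanA (d2.keys.length + 1) PySem.Dict.empty d2 thisID with
      | some r => (r.items, true)
      | none => (d2.items, true)
    else (d.items, false)
  else
    let d1 := d.insert baseID neighbors
    let d2 := neighbors.foldl (fun acc n => linkNodes acc n baseID) d1
    match cleanA (d2.keys.length + 1) PySem.Dict.empty d2 thisID with
    | some r => (r.items, true)
    | none => (d2.items, true)

-- ===== PORT B =====
-- one forward link per neighbor (Source B's loop body)
def bLink (d : pvTopo) (baseID n : String) : pvTopo :=
  match d.get? n with
  | none => d.insert n [baseID]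
  | some adj => if adj.contains baseID then d else d.insert n (adj ++ [baseID])

-- termination lemma for cleanB (cited by its decreasing_by): visiting a fresh node strictly
-- shrinks the set of keys of `old` still missing from the accumulated topology
theorem pvMissing_lt {old topo : pvTopo} {x : String} {vs : List String}
    (hx : topo.contains x = false) (hget : old.get? x = some vs) :
    (old.keys.filter (fun k => !((topo.insert x vs).contains k))).length
      < (old.keys.filter (fun k => !(topo.contains k))).length := by
  have hxk : x ∈ old.keys := by
    have : old.contains x = true := by
      rw [PySem.Dict.contains_eq_isSome_get?, hget]; rfl
    exact (PySem.Dict.contains_iff_mem_keys _ _).1 this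
  have hsplit : (old.keys.filter (fun k => !((topo.insert x vs).contains k)))
      = (old.keys.filter (fun k => !(topo.contains k))).filter (fun k => !(k == x)) := by
    rw [List.filter_filter]
    apply List.filter_congr
    intro k _
    rw [PySem.Dict.contains_insert]
    cases h1 : (k == x) <;> cases h2 : topo.contains k <;> simp_all
  rw [hsplit]
  apply List.length_filter_lt_length_iff_exists.2
  exact ⟨x, List.mem_filter.2 ⟨hxk, by simp [hx]⟩, by simp⟩

-- iterative worklist DFS (Source B's while loop); `none` = Python's KeyError (excluded by Pre_)
def cleanB (old : pvTopo) : pvTopo → List String → Option pvTopo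
  | topo, [] => some topo
  | topo, x :: stack =>
    if h : topo.contains x then cleanB old topo stack
    else
      match hg : old.get? x with
      | none => none
      | some vs => cleanB old (topo.insert x vs) (vs ++ stack)
termination_by topo stack => ((old.keys.filter (fun k => !(topo.contains k))).length, stack.length)
decreasing_by
  · exact Prod.Lex.right _ (Nat.lt_succ_self _)
  · exact Prod.Lex.left _ _ (pvMissing_lt (Bool.not_eq_true _ ▸ eq_false_of_ne_true h) hg)

def checkAndUpdateTopology_alt (routeTopology : List (String × List String)) (baseID : String) (neighbors : List String) (thisID : String) : (List (String × List String)) × Bool :=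
  let d := PySem.Dict.ofList routeTopology
  let changed : Bool := !d.contains baseID
      || decide (PySem.List.sorted neighbors (fun x => x.toList) false ≠ PySem.List.sorted (d.getD baseID []) (fun x => x.toList) false)
  if changed then
    let u0 := d.insert baseID neighbors
    let u := neighbors.foldl (fun acc n => bLink acc baseID n) u0
    match cleanB u PySem.Dict.empty [thisID] with
    | some r => (r.items, true)
    | none => ([], true)
  else (d.items, false)

-- ===== PRECONDITION & SPEC =====
-- Helpers Pre_ is stated with: the updated adjacency map (input map, baseID ↦ neighbors, each
-- neighbor gains a back-link to baseID) and the set of nodes reachable from a start node in it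
-- (a plain graph closure over the input; nodes without an entry are collected but not expanded).
def pvUpdated (routeTopology : List (String × List String)) (baseID : String) (neighbors : List String) : pvTopo :=
  neighbors.foldl (fun acc n =>
      match acc.get? n with
      | none => acc.insert n [baseID]
      | some adj => if adj.contains baseID then acc else acc.insert n (adj ++ [baseID]))
    ((PySem.Dict.ofList routeTopology).insert baseID neighbors)

-- termination lemmas for pvReachGo (cited by its decreasing_by)
theorem pvVisFilt_eq (u : pvTopo) (vis : List String) (x : String) (hg : u.get? x = none) :
    (u.keys.filter (fun k => !((vis ++ [x]).contains k))).length
      = (u.keys.filter (fun k => !(vis.contains k))).length := by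
  congr 1
  apply List.filter_congr
  intro k hk
  have hne : k ≠ x := by
    intro h
    subst h
    have : u.contains k = true := (PySem.Dict.contains_iff_mem_keys _ _).2 hk
    rw [PySem.Dict.contains_eq_isSome_get?, hg] at this
    cases this
  simp [hne]

theorem pvVisFilt_lt (u : pvTopo) (vis : List String) (x : String) (vs : List String)
    (hx : x ∉ vis) (hg : u.get? x = some vs) :
    (u.keys.filter (fun k => !((vis ++ [x]).contains k))).length
      < (u.keys.filter (fun k => !(vis.contains k))).length := by
  have hxk : x ∈ u.keys := by
    have : u.contains x = true := by
      rw [PySem.Dict.contains_eq_isSome_get?, hg]; rfl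
    exact (PySem.Dict.contains_iff_mem_keys _ _).1 this
  have hsplit : (u.keys.filter (fun k => !((vis ++ [x]).contains k)))
      = (u.keys.filter (fun k => !(vis.contains k))).filter (fun k => !(k == x)) := by
    rw [List.filter_filter]
    apply List.filter_congr
    intro k _
    cases h1 : (k == x) <;> simp_all
  rw [hsplit]
  apply List.length_filter_lt_length_iff_exists.2
  exact ⟨x, List.mem_filter.2 ⟨hxk, by simp [hx]⟩, by simp⟩

-- nodes reachable from the stack in u: missing nodes are recorded but not expanded
def pvReachGo (u : pvTopo) : List String → List String → List String
  | vis, [] => vis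
  | vis, x :: stack =>
    if h : x ∈ vis then pvReachGo u vis stack
    else
      match hg : u.get? x with
      | none => pvReachGo u (vis ++ [x]) stack
      | some vs => pvReachGo u (vis ++ [x]) (vs ++ stack)
termination_by vis stack => ((u.keys.filter (fun k => !(vis.contains k))).length, stack.length)
decreasing_by
  · exact Prod.Lex.right _ (Nat.lt_succ_self _)
  · exact pvVisFilt_eq u vis x hg ▸ Prod.Lex.right _ (Nat.lt_succ_self _)
  · exact Prod.Lex.left _ _ (pvVisFilt_lt u vis x vs h hg)

-- Pre_ excludes exactly the inputs where A raises KeyError: when a change is made, every node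
-- reachable from thisID in the updated adjacency map must have an entry there (on such inputs
-- A's recursive cleanRouteTopology — and B's worklist DFS — looks up a node with no entry).
def Pre_checkAndUpdateTopology (routeTopology : List (String × List String)) (baseID : String) (neighbors : List String) (thisID : String) : Prop :=
  (baseID ∉ routeTopology.map Prod.fst ∨
      PySem.List.sorted neighbors (fun x => x.toList) false ≠ PySem.List.sorted ((PySem.Dict.ofList routeTopology).getD baseID []) (fun x => x.toList) false) →
    ∀ k ∈ pvReachGo (pvUpdated routeTopology baseID neighbors) [] [thisID],
      (pvUpdated routeTopology baseID neighbors).contains k = true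
instance (routeTopology : List (String × List String)) (baseID : String) (neighbors : List String) (thisID : String) : Decidable (Pre_checkAndUpdateTopology routeTopology baseID neighbors thisID) := by unfold Pre_checkAndUpdateTopology; infer_instance

def pvWitness_checkAndUpdateTopology : (List (String × List String)) × String × List String × String :=
  ([("a", ["b"])], "a", ["b"], "a")

def Spec_checkAndUpdateTopology (routeTopology : List (String × List String)) (baseID : String) (neighbors : List String) (thisID : String) (out : (List (String × List String)) × Bool) : Prop := out = checkAndUpdateTopology_alt routeTopology baseID neighbors thisID
instance (routeTopology : List (String × List String)) (baseID : String) (neighbors : List String) (thisID : String) (out : (List (String × List String)) × Bool) : Decidable (Spec_checkAndUpdateTopology routeTopology baseID neighbors thisID out) := by unfold Spec_checkAndUpdateTopology; infer_instance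

-- ===== CLAIM (what is proved, stated in full; the proofs are below) =====
def Claim_equal_checkAndUpdateTopology : Prop := ∀ (routeTopology : List (String × List String)) (baseID : String) (neighbors : List String) (thisID : String), Dom_checkAndUpdateTopology routeTopology baseID neighbors thisID → Pre_checkAndUpdateTopology routeTopology baseID neighbors thisID → Spec_checkAndUpdateTopology routeTopology baseID neighbors thisID (checkAndUpdateTopology routeTopology baseID neighbors thisID)

-- ===== LEMMAS AND PROOFS =====

theorem linkStep_eq (d : pvTopo) (base n : String) (L : List String)
    (hb : d.get? base = some L) (hnL : n ∈ L) :
    linkNodes d n base = bLink d base n ∧ (linkNodes d n base).get? base = some L := by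
  have hcb : d.contains base = true := by rw [PySem.Dict.contains_eq_isSome_get?, hb]; rfl
  unfold linkNodes bLink
  cases hn : d.get? n with
  | none =>
    have hne : base ≠ n := by intro h; rw [h, hn] at hb; cases hb
    have hcn : d.contains n = false := by rw [PySem.Dict.contains_eq_isSome_get?, hn]; rfl
    have hg1 : (d.insert n [base]).get? base = some L := by
      rw [PySem.Dict.get?_insert_of_ne _ _ hne, hb]
    have hc1 : (d.insert n [base]).contains base = true := by
      rw [PySem.Dict.contains_eq_isSome_get?, hg1]; rfl
    have hgd1 : (d.insert n [base]).getD base [] = L := by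
      rw [PySem.Dict.getD_eq_get?_getD, hg1]; rfl
    simp only [hcn, hc1, hgd1, Bool.false_eq_true, if_false, if_true]
    rw [if_pos (show L.contains n = true by simpa using hnL)]
    exact ⟨rfl, hg1⟩
  | some adj =>
    have hcn : d.contains n = true := by rw [PySem.Dict.contains_eq_isSome_get?, hn]; rfl
    have hgdn : d.getD n [] = adj := by rw [PySem.Dict.getD_eq_get?_getD, hn]; rfl
    have hgd : d.getD base [] = L := by rw [PySem.Dict.getD_eq_get?_getD, hb]; rfl
    simp only [hcn, hgdn, if_true]
    cases hmem : adj.contains base with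
    | true =>
      simp only [reduceIte, hcb, hgd]
      rw [if_pos (show L.contains n = true by simpa using hnL)]
      exact ⟨rfl, hb⟩
    | false =>
      have hne : base ≠ n := by
        intro h; subst h
        rw [hn] at hb; injection hb with h'; subst h'
        exact absurd hnL (by simpa using hmem)
      have hg1 : (d.insert n (adj ++ [base])).get? base = some L := by
        rw [PySem.Dict.get?_insert_of_ne _ _ hne, hb]
      have hc1 : (d.insert n (adj ++ [base])).contains base = true := by
        rw [PySem.Dict.contains_eq_isSome_get?, hg1]; rfl
      have hgd1 : (d.insert n (adj ++ [base])).getD base [] = L := by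
        rw [PySem.Dict.getD_eq_get?_getD, hg1]; rfl
      simp only [Bool.false_eq_true, if_false, reduceIte, hc1, hgd1]
      rw [if_pos (show L.contains n = true by simpa using hnL)]
      exact ⟨rfl, hg1⟩

theorem foldEq (base : String) : ∀ (ns : List String) (d : pvTopo) (L : List String),
    d.get? base = some L → (∀ n ∈ ns, n ∈ L) →
    ns.foldl (fun acc n => linkNodes acc n base) d = ns.foldl (fun acc n => bLink acc base n) d := by
  intro ns
  induction ns with
  | nil => intro d L _ _; rfl
  | cons n ns ih =>
    intro d L hb hmem
    have h := linkStep_eq d base n L hb (hmem n (by simp))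
    simp only [List.foldl_cons, h.1]
    rw [← h.1]
    exact ih _ L h.2 (fun m hm => hmem m (by simp [hm]))

-- the fold pvUpdated is stated with is B's fold (bLink is exactly that match)
theorem pvUpdated_eq (rt : List (String × List String)) (base : String) (nbs : List String) :
    pvUpdated rt base nbs
      = nbs.foldl (fun acc n => bLink acc base n) ((PySem.Dict.ofList rt).insert base nbs) := rfl

theorem contains_insert_mono (d : pvTopo) (k : String) (v : List String) (j : String)
    (h : d.contains j = true) : (d.insert k v).contains j = true := by
  rw [PySem.Dict.contains_insert]; simp [h]

theorem contains_ofList (rt : List (String × List String)) (k : String) :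
    (PySem.Dict.ofList rt).contains k = true ↔ k ∈ rt.map Prod.fst := by
  rw [PySem.Dict.contains_iff_mem_keys]
  show k ∈ (List.foldl (fun acc p => acc.insert p.1 p.2) PySem.Dict.empty rt).keys ↔ _
  rw [PySem.Dict.keys_foldl_insert_key rt Prod.fst (fun d x => x.2) PySem.Dict.empty]
  rw [PySem.Set.mem_update]
  simp [PySem.Dict.keys_empty]

theorem cleanB_nil (old topo : pvTopo) : cleanB old topo [] = some topo := by rw [cleanB]
theorem cleanB_skip (old topo : pvTopo) (x : String) (st : List String) (h : topo.contains x = true) :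
    cleanB old topo (x :: st) = cleanB old topo st := by
  rw [cleanB]; simp [h]
theorem cleanB_keyerr (old topo : pvTopo) (x : String) (st : List String) (h : topo.contains x = false)
    (hg : old.get? x = none) : cleanB old topo (x :: st) = none := by
  rw [cleanB]; rw [dif_neg (by simp [h])]; split <;> simp_all
theorem cleanB_step (old topo : pvTopo) (x : String) (st vs : List String) (h : topo.contains x = false)
    (hg : old.get? x = some vs) : cleanB old topo (x :: st) = cleanB old (topo.insert x vs) (vs ++ st) := by
  rw [cleanB]; rw [dif_neg (by simp [h])]; split <;> simp_all

theorem pvReachGo_nil (u : pvTopo) (vis : List String) : pvReachGo u vis [] = vis := by rw [pvReachGo]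
theorem pvReachGo_skip (u : pvTopo) (vis : List String) (x : String) (st : List String)
    (h : x ∈ vis) : pvReachGo u vis (x :: st) = pvReachGo u vis st := by
  rw [pvReachGo]; simp [h]
theorem pvReachGo_miss (u : pvTopo) (vis : List String) (x : String) (st : List String)
    (h : x ∉ vis) (hg : u.get? x = none) :
    pvReachGo u vis (x :: st) = pvReachGo u (vis ++ [x]) st := by
  rw [pvReachGo]; rw [dif_neg h]; split <;> simp_all
theorem pvReachGo_step (u : pvTopo) (vis : List String) (x : String) (st vs : List String)
    (h : x ∉ vis) (hg : u.get? x = some vs) :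
    pvReachGo u vis (x :: st) = pvReachGo u (vis ++ [x]) (vs ++ st) := by
  rw [pvReachGo]; rw [dif_neg h]; split <;> simp_all

theorem pvReachGo_mono (u : pvTopo) : ∀ (vis stack : List String) (k : String),
    k ∈ vis → k ∈ pvReachGo u vis stack := by
  intro vis stack
  induction vis, stack using pvReachGo.induct u with
  | case1 vis => intro k hk; rw [pvReachGo_nil]; exact hk
  | case2 vis x st h ih => intro k hk; rw [pvReachGo_skip u vis x st h]; exact ih k hk
  | case3 vis x st h hg ih =>
    intro k hk; rw [pvReachGo_miss u vis x st h hg]; exact ih k (by simp [hk])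
  | case4 vis x st h vs hg ih =>
    intro k hk; rw [pvReachGo_step u vis x st vs h hg]; exact ih k (by simp [hk])

-- B's DFS never hits a missing node when every node of the reach set has an entry; `vis` mirrors
-- the keys of the accumulated topology
theorem cleanB_ne_none_of_reach (u : pvTopo) : ∀ (topo : pvTopo) (stack : List String),
    ∀ (vis : List String),
    (∀ k, topo.contains k = true ↔ k ∈ vis) →
    (∀ k ∈ pvReachGo u vis stack, u.contains k = true) →
    cleanB u topo stack ≠ none := by
  intro topo stack
  induction topo, stack using cleanB.induct u with
  | case1 topo =>
    intro vis _ _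
    rw [cleanB_nil]
    simp
  | case2 topo x st hc ih =>
    intro vis hcorr hreach
    have hx : x ∈ vis := (hcorr x).1 hc
    rw [cleanB_skip u topo x st hc]
    rw [pvReachGo_skip u vis x st hx] at hreach
    exact ih vis hcorr hreach
  | case3 topo x st hc hg =>
    intro vis hcorr hreach
    have hx : x ∉ vis := fun h => by
      have := (hcorr x).2 h
      exact absurd this (by simp [Bool.not_eq_true _ ▸ eq_false_of_ne_true hc])
    rw [pvReachGo_miss u vis x st hx hg] at hreach
    have hxin : x ∈ pvReachGo u (vis ++ [x]) st := pvReachGo_mono u _ st x (by simp)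
    have := hreach x hxin
    rw [PySem.Dict.contains_eq_isSome_get?, hg] at this
    cases this
  | case4 topo x st hc vs hg ih =>
    intro vis hcorr hreach
    have hx : x ∉ vis := fun h => hc ((hcorr x).2 h)
    rw [cleanB_step u topo x st vs (eq_false_of_ne_true hc) hg]
    rw [pvReachGo_step u vis x st vs hx hg] at hreach
    refine ih (vis ++ [x]) ?_ hreach
    intro k
    rw [PySem.Dict.contains_insert]
    constructor
    · intro h
      rcases Bool.or_eq_true_iff.1 h with h | h
      · have : k = x := by simpa using h
        simp [this]
      · exact List.mem_append.2 (Or.inl ((hcorr k).1 h))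
    · intro h
      rcases List.mem_append.1 h with h | h
      · simp [(hcorr k).2 h]
      · simp [List.mem_singleton.1 h]

-- cleanA keys-monotonicity, by fuel then list induction
def pvSM (f : Nat) : Prop := ∀ (topo old : pvTopo) (x : String) (t : pvTopo),
  cleanA f topo old x = some t → ∀ k, topo.contains k = true → t.contains k = true
def pvSML (f : Nat) : Prop := ∀ (vs : List String) (topo old : pvTopo) (t : pvTopo),
  cleanAList f topo old vs = some t → ∀ k, topo.contains k = true → t.contains k = true

theorem pvSML_of_SM (f : Nat) (hm : pvSM f) : pvSML f := by
  intro vs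
  induction vs with
  | nil =>
    intro topo old t h k hk
    rw [cleanAList] at h
    cases h; exact hk
  | cons v vs ih =>
    intro topo old t h k hk
    rw [cleanAList] at h
    by_cases hc : topo.contains v = true
    · rw [if_pos hc] at h
      exact ih topo old t h k hk
    · rw [if_neg hc] at h
      cases hca : cleanA f topo old v with
      | none => rw [hca] at h; cases h
      | some t1 =>
        rw [hca] at h
        exact ih t1 old t h k (hm topo old v t1 hca k hk)

theorem pvSM_succ (f : Nat) (hl : pvSML f) : pvSM (f + 1) := by
  intro topo old x t h k hk
  rw [cleanA] at h
  cases hg : old.get? x with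
  | none => rw [hg] at h; cases h
  | some vs =>
    rw [hg] at h
    exact hl vs (topo.insert x vs) old t h k (contains_insert_mono _ _ _ _ hk)

theorem pvSM_all (f : Nat) : pvSM f := by
  induction f with
  | zero => intro topo old x t h; rw [cleanA] at h; cases h
  | succ f ih => exact pvSM_succ f (pvSML_of_SM f ih)

-- missing-count helper
def pvMissing (old topo : pvTopo) : Nat := (old.keys.filter (fun k => !(topo.contains k))).length

theorem pvMissing_mono (old topo t : pvTopo)
    (h : ∀ k, topo.contains k = true → t.contains k = true) :
    pvMissing old t ≤ pvMissing old topo := by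
  unfold pvMissing
  rw [← List.countP_eq_length_filter, ← List.countP_eq_length_filter]
  apply List.countP_mono_left
  intro k _ hkt
  cases hk : topo.contains k with
  | false => rfl
  | true => simp [h k hk] at hkt

def pvSE (old : pvTopo) (f : Nat) : Prop := ∀ (topo : pvTopo) (x : String) (stack : List String),
  topo.contains x = false → pvMissing old topo ≤ f →
  cleanB old topo (x :: stack) = (cleanA f topo old x).bind (fun t => cleanB old t stack)
def pvSEL (old : pvTopo) (f : Nat) : Prop := ∀ (vs : List String) (topo : pvTopo) (stack : List String),
  pvMissing old topo ≤ f →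
  cleanB old topo (vs ++ stack) = (cleanAList f topo old vs).bind (fun t => cleanB old t stack)

theorem pvSEL_of_SE (old : pvTopo) (f : Nat) (he : pvSE old f) : pvSEL old f := by
  intro vs
  induction vs with
  | nil =>
    intro topo stack hm
    rw [cleanAList]; rfl
  | cons v vs ih =>
    intro topo stack hm
    rw [cleanAList]
    by_cases hc : topo.contains v = true
    · rw [if_pos hc, List.cons_append, cleanB_skip old topo v _ hc]
      exact ih topo stack hm
    · rw [if_neg hc, List.cons_append]
      rw [he topo v (vs ++ stack) (by simpa using hc) hm]
      cases hca : cleanA f topo old v with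
      | none => rfl
      | some t =>
        simp only [Option.bind_some]
        have hmt : pvMissing old t ≤ f :=
          le_trans (pvMissing_mono old topo t (pvSM_all f topo old v t hca ·)) hm
        exact ih t stack hmt

theorem pvSE_zero (old : pvTopo) : pvSE old 0 := by
  intro topo x stack hx hm
  rw [cleanA]
  have hg : old.get? x = none := by
    cases hg : old.get? x with
    | none => rfl
    | some vs =>
      exfalso
      have hxk : x ∈ old.keys := by
        have : old.contains x = true := by rw [PySem.Dict.contains_eq_isSome_get?, hg]; rfl
        exact (PySem.Dict.contains_iff_mem_keys _ _).1 this
      have : x ∈ old.keys.filter (fun k => !(topo.contains k)) :=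
        List.mem_filter.2 ⟨hxk, by simp [hx]⟩
      have : 0 < pvMissing old topo := by
        unfold pvMissing; exact List.length_pos_of_mem this
      omega
  rw [cleanB_keyerr old topo x stack hx hg]; rfl

theorem pvSE_succ (old : pvTopo) (f : Nat) (hl : pvSEL old f) : pvSE old (f + 1) := by
  intro topo x stack hx hm
  rw [cleanA]
  cases hg : old.get? x with
  | none => rw [cleanB_keyerr old topo x stack hx hg]; rfl
  | some vs =>
    rw [cleanB_step old topo x stack vs hx hg]
    have hlt : pvMissing old (topo.insert x vs) < pvMissing old topo := pvMissing_lt hx hg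
    exact hl vs (topo.insert x vs) stack (by omega)

theorem pvSE_all (old : pvTopo) (f : Nat) : pvSE old f := by
  induction f with
  | zero => exact pvSE_zero old
  | succ f ih => exact pvSE_succ old f (pvSEL_of_SE old f ih)

theorem changeEq (u : pvTopo) (tid : String)
    (hok : ∀ k ∈ pvReachGo u [] [tid], u.contains k = true) :
    (match cleanA (u.keys.length + 1) PySem.Dict.empty u tid with
      | some r => (r.items, true)
      | none => (u.items, true))
    = (match cleanB u PySem.Dict.empty [tid] with
      | some r => (r.items, true)
      | none => (([] : List (String × List String)), true)) := by
  have hcorr : ∀ k, (PySem.Dict.empty : pvTopo).contains k = true ↔ k ∈ ([] : List String) := by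
    intro k
    simp [PySem.Dict.contains_empty]
  have hne : cleanB u PySem.Dict.empty [tid] ≠ none :=
    cleanB_ne_none_of_reach u PySem.Dict.empty [tid] [] hcorr hok
  have heq : cleanB u PySem.Dict.empty [tid] = (cleanA (u.keys.length + 1) PySem.Dict.empty u tid).bind
      (fun t => cleanB u t []) := by
    apply pvSE_all u (u.keys.length + 1) (PySem.Dict.empty : pvTopo) tid []
    · rfl
    · unfold pvMissing
      have := List.length_filter_le (fun k => !(PySem.Dict.contains (PySem.Dict.empty : pvTopo) k)) u.keys
      omega
  cases hca : cleanA (u.keys.length + 1) PySem.Dict.empty u tid with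
  | none =>
    exfalso
    apply hne
    rw [heq, hca]; rfl
  | some t =>
    have : cleanB u PySem.Dict.empty [tid] = some t := by
      rw [heq, hca]; simp [cleanB_nil]
    rw [this]

theorem main_spec (rt : List (String × List String)) (base : String) (nb : List String) (tid : String)
    (hpre : Pre_checkAndUpdateTopology rt base nb tid) :
    checkAndUpdateTopology rt base nb tid = checkAndUpdateTopology_alt rt base nb tid := by
  unfold checkAndUpdateTopology checkAndUpdateTopology_alt
  have hfold : nb.foldl (fun acc n => linkNodes acc n base) ((PySem.Dict.ofList rt).insert base nb)
      = pvUpdated rt base nb := by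
    rw [pvUpdated_eq]
    exact foldEq base nb _ nb (PySem.Dict.get?_insert_self _ _ _) (fun n hn => hn)
  by_cases hcb : (PySem.Dict.ofList rt).contains base = true
  · by_cases hs : PySem.List.sorted nb (fun x => x.toList) false
        = PySem.List.sorted ((PySem.Dict.ofList rt).getD base []) (fun x => x.toList) false
    · simp only [hcb, hs, if_true, not_true, Bool.not_true]
      simp
    · have hok := hpre (Or.inr hs)
      rw [if_pos hcb, if_pos hs]
      dsimp only
      rw [hcb]
      simp only [Bool.not_true, Bool.false_or, decide_eq_true_eq, ne_eq, hs, not_false_iff, if_true]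
      rw [hfold, ← pvUpdated_eq]
      exact changeEq (pvUpdated rt base nb) tid hok
  · have hnb : base ∉ rt.map Prod.fst := fun h => hcb ((contains_ofList rt base).2 h)
    have hok := hpre (Or.inl hnb)
    rw [if_neg hcb]
    dsimp only
    rw [eq_false_of_ne_true hcb]
    simp only [Bool.not_false, Bool.true_or, if_true]
    rw [hfold, ← pvUpdated_eq]
    exact changeEq (pvUpdated rt base nb) tid hok

-- ===== VERDICT (by name: the statement is the Claim_ definition above) =====
theorem checkAndUpdateTopology_spec : Claim_equal_checkAndUpdateTopology := by
  intro rt base nb tid _ hpre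
  unfold Spec_checkAndUpdateTopology
  exact main_spec rt base nb tid hpre
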